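-- pv_equiv track=rewrite | github.com/high-schoolers/Tusmo | fonctions.py | diff4
-- ===== SOURCE A (Python) =====
-- def diff4(solution,guess,t):
--     for i in range(len(solution)):
--         lettre = solution[i]
--         for j in range(len(guess)):
--             if guess[j] == guess[i]:
--                 if guess[j] == lettre:
--                     t[i] = 2
--                     pass
--     return t
-- ===== SOURCE B (Python) =====
-- # Single pass over zip(solution, guess): the inner scan of A reduces to guess[i] == solution[i].
-- # Like A, mutates t in place and returns it.
-- def diff4(solution, guess, t):
--     for i, (s, g) in enumerate(zip(solution, guess)):
--         if s == g:
--             t[i] = 2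
--     return t
-- ===== Notes on version B (the rewrite author's own statement) =====
-- stated objective: faster
-- what changed: Replaced the nested scan (whose inner loop over guess only ever fires at j==i, i.e. when guess[i]==solution[i]) by a single pass over enumerate(zip(solution, guess)) setting t[i]=2 on a match.
import Mathlib
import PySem

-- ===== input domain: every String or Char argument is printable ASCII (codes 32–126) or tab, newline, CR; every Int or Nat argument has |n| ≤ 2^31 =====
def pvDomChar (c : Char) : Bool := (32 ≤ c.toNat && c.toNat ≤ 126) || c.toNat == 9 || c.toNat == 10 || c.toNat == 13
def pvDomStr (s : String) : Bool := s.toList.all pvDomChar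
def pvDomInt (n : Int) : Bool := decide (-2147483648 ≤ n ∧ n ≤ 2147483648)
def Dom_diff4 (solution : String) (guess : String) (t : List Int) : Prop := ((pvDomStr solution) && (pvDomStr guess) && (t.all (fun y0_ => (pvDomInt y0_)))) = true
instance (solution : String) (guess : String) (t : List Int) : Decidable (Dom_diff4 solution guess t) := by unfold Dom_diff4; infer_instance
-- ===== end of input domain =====

-- B replaces A's nested scan by one pass over zip(solution, guess) (asymptotically faster);
-- equivalence is about the RETURN value (both Pythons mutate t in place identically on Pre_).

-- ===== PORT A =====
-- pyGetD/pySetD are exact under Pre_diff4 (every index read or written is in range there).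
def diff4 (solution : String) (guess : String) (t : List Int) : List Int :=
  let s := solution.toList
  let g := guess.toList
  (PySem.List.pyRange 0 (s.length : Int) 1).foldl (fun t i =>
    let lettre := PySem.List.pyGetD s i ' '
    (PySem.List.pyRange 0 (g.length : Int) 1).foldl (fun t j =>
      if PySem.List.pyGetD g j ' ' == PySem.List.pyGetD g i ' ' then
        if PySem.List.pyGetD g j ' ' == lettre then PySem.List.pySetD t i 2
        else t
      else t) t) t

-- ===== PORT B =====
-- 'for i, (a, b) in enumerate(zip(solution, guess)): if a == b: t[i] = 2'
def diff4Go (i : Nat) (pairs : List (Char × Char)) (t : List Int) : List Int :=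
  match pairs with
  | [] => t
  | (a, b) :: rest => diff4Go (i + 1) rest (if a == b then t.set i 2 else t)

def diff4_alt (solution : String) (guess : String) (t : List Int) : List Int :=
  diff4Go 0 (solution.toList.zip guess.toList) t

-- ===== PRECONDITION & SPEC =====
-- Pre_ is exactly where Python A returns: A raises IndexError on guess[i] when solution is
-- longer than a nonempty guess, and on t[i] = 2 when a matching position i is outside t.
def Pre_diff4 (solution : String) (guess : String) (t : List Int) : Prop :=
  (guess.toList.length = 0 ∨ solution.toList.length ≤ guess.toList.length) ∧
  ∀ i : Nat, i < min solution.toList.length guess.toList.length →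
    solution.toList.getD i ' ' = guess.toList.getD i ' ' → i < t.length
instance (solution : String) (guess : String) (t : List Int) : Decidable (Pre_diff4 solution guess t) := by unfold Pre_diff4; infer_instance

def pvWitness_diff4 : String × String × List Int := ("abc", "axc", [0, 0, 0])

def Spec_diff4 (solution : String) (guess : String) (t : List Int) (out : List Int) : Prop := out = diff4_alt solution guess t
instance (solution : String) (guess : String) (t : List Int) (out : List Int) : Decidable (Spec_diff4 solution guess t out) := by unfold Spec_diff4; infer_instance

-- ===== CLAIM (what is proved, stated in full; the proofs are below) =====
def Claim_equal_diff4 : Prop := ∀ (solution : String) (guess : String) (t : List Int), Dom_diff4 solution guess t → Pre_diff4 solution guess t → Spec_diff4 solution guess t (diff4 solution guess t)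

-- ===== LEMMAS AND PROOFS =====

-- A loop that either sets index i to 2 or leaves t alone: the result is a single conditional set.
lemma foldl_trigger (L : List Int) (P Q : Int → Bool) (upd : List Int → List Int)
    (hupd : ∀ t, upd (upd t) = upd t) (t : List Int) :
    L.foldl (fun t j => if P j then if Q j then upd t else t else t) t
      = if L.any (fun j => P j && Q j) then upd t else t := by
  induction L generalizing t with
  | nil => simp
  | cons j L ih =>
    simp only [List.foldl_cons, List.any_cons, ih]
    have hinit : (if P j then if Q j then upd t else t else t)
        = if (P j && Q j) then upd t else t := by
      cases P j <;> cases Q j <;> simp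
    rw [hinit]; clear hinit
    rcases Bool.eq_false_or_eq_true (P j && Q j) with hPQ | hPQ <;>
      rcases Bool.eq_false_or_eq_true (L.any fun j => P j && Q j) with hA | hA <;>
        simp only [hPQ, hA] <;> simp [hupd]

-- A's inner loop over guess collapses to the test guess[i] == solution[i].
lemma inner_eq (s g : List Char) (i : Int) (hi0 : 0 ≤ i) (hi : i.toNat < s.length)
    (hsg : s.length ≤ g.length) (t : List Int) :
    (PySem.List.pyRange 0 (g.length : Int) 1).foldl (fun t j =>
        if PySem.List.pyGetD g j ' ' == PySem.List.pyGetD g i ' ' then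
          if PySem.List.pyGetD g j ' ' == PySem.List.pyGetD s i ' ' then PySem.List.pySetD t i 2
          else t
        else t) t
      = if g.getD i.toNat ' ' == s.getD i.toNat ' ' then PySem.List.pySetD t i 2 else t := by
  have hig : i.toNat < g.length := lt_of_lt_of_le hi hsg
  obtain ⟨n, rfl⟩ := Int.eq_ofNat_of_zero_le hi0
  simp only [Int.toNat_natCast] at hi hig ⊢
  rw [foldl_trigger _ _ _ (fun t => PySem.List.pySetD t (n : Int) 2) (fun t => by
    simp [PySem.List.pySetD_natCast, List.set_set]) t]
  have hgi : PySem.List.pyGetD g (n : Int) ' ' = g.getD n ' ' := by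
    simp [PySem.List.pyGetD_natCast]
  have hsi : PySem.List.pyGetD s (n : Int) ' ' = s.getD n ' ' := by
    simp [PySem.List.pyGetD_natCast]
  have hany : ((PySem.List.pyRange 0 (g.length : Int) 1).any fun j =>
      (PySem.List.pyGetD g j ' ' == PySem.List.pyGetD g (n : Int) ' ') &&
      (PySem.List.pyGetD g j ' ' == PySem.List.pyGetD s (n : Int) ' '))
      = (g.getD n ' ' == s.getD n ' ') := by
    cases h : (g.getD n ' ' == s.getD n ' ') with
    | true =>
      rw [List.any_eq_true]
      refine ⟨(n : Int), by rw [PySem.List.mem_pyRange_one]; omega, ?_⟩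
      simp only [hgi, hsi, Bool.and_eq_true, beq_self_eq_true, true_and]
      exact h
    | false =>
      rw [List.any_eq_false]
      intro j hj
      simp only [Bool.and_eq_true, beq_iff_eq, not_and]
      intro h1 h2
      rw [h1] at h2
      rw [hgi, hsi] at h2
      rw [h2] at h
      simp at h
  rw [hany]
  rfl

-- B's recursion as a fold over List.range.
lemma go_eq (pairs : List (Char × Char)) : ∀ (k : Nat) (t : List Int),
    diff4Go k pairs t = (List.range pairs.length).foldl (fun t j =>
      if (pairs.getD j (' ', ' ')).1 == (pairs.getD j (' ', ' ')).2 then t.set (k + j) 2 else t) t := by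
  induction pairs with
  | nil => intro k t; simp [diff4Go]
  | cons p rest ih =>
    intro k t
    obtain ⟨a, b⟩ := p
    rw [show ((a, b) :: rest).length = rest.length + 1 from rfl, List.range_succ_eq_map]
    simp only [List.foldl_cons, List.getD_cons_zero, Nat.add_zero, List.foldl_map, Nat.succ_eq_add_one]
    rw [diff4Go, ih (k + 1)]
    congr 1
    funext t j
    rw [show k + (j + 1) = (k + 1) + j from by omega]
    rfl

-- main agreement lemma
lemma diff4_eq_alt (solution guess : String) (t : List Int)
    (hpre : Pre_diff4 solution guess t) :
    diff4 solution guess t = diff4_alt solution guess t := by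
  obtain ⟨h1, -⟩ := hpre
  unfold diff4 diff4_alt
  set s := solution.toList with hs
  set g := guess.toList with hg
  rcases h1 with h1 | h1
  · -- guess is empty: A's inner loop is empty, B's zip is empty
    have hgnil : g = [] := List.length_eq_zero_iff.mp h1
    rw [hgnil]
    simp [diff4Go, PySem.List.pyRange_zero_nat, List.zip_nil_right]
  · -- len(solution) ≤ len(guess)
    have houter : (PySem.List.pyRange 0 (s.length : Int) 1).foldl (fun t i =>
        let lettre := PySem.List.pyGetD s i ' '
        (PySem.List.pyRange 0 (g.length : Int) 1).foldl (fun t j =>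
          if PySem.List.pyGetD g j ' ' == PySem.List.pyGetD g i ' ' then
            if PySem.List.pyGetD g j ' ' == lettre then PySem.List.pySetD t i 2
            else t
          else t) t) t
        = (PySem.List.pyRange 0 (s.length : Int) 1).foldl (fun t i =>
            if g.getD i.toNat ' ' == s.getD i.toNat ' ' then PySem.List.pySetD t i 2 else t) t := by
      apply PySem.List.foldl_congr_mem'
      intro i hi acc
      rw [PySem.List.mem_pyRange_one] at hi
      exact inner_eq s g i hi.1 (by omega) h1 acc
    rw [houter]
    have hrange : (PySem.List.pyRange 0 (s.length : Int) 1)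
        = (List.range s.length).map (fun k : Nat => (k : Int)) := by
      rw [PySem.List.pyRange_one]
      simp
    rw [hrange, List.foldl_map, go_eq]
    have hzlen : (s.zip g).length = s.length := by
      rw [List.length_zip]; omega
    rw [hzlen]
    apply PySem.List.foldl_congr_mem'
    intro k hk acc
    rw [List.mem_range] at hk
    have hkg : k < g.length := by omega
    have hz : (s.zip g).getD k (' ', ' ') = (s[k], g[k]) := by
      rw [List.getD_eq_getElem _ _ (by omega : k < (s.zip g).length)]
      simp
    simp only [hz, Int.toNat_natCast, PySem.List.pySetD_natCast, Nat.zero_add,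
      List.getD_eq_getElem s _ hk, List.getD_eq_getElem g _ hkg]
    simp only [beq_iff_eq]
    by_cases h : s[k] = g[k]
    · simp [h]
    · have h2 : ¬ g[k] = s[k] := fun hgk => h hgk.symm
      simp [h, h2]

-- ===== VERDICT (by name: the statement is the Claim_ definition above) =====
theorem diff4_spec : Claim_equal_diff4 := by
  intro solution guess t _ hpre
  unfold Spec_diff4
  exact diff4_eq_alt solution guess t hpre
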